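-- pv_equiv track=rewrite | github.com/sz012/ASD-AGH | Exams/2425 (mine)/1/B/egz1B.py | bfs_modified
-- ===== SOURCE A (Python) =====
-- from collections import deque
--
-- def bfs_modified(graph, start, deleted):
--     visited = set()
--     queue = deque()
--
--     visited.add(start)
--     queue.append(start)
--     order = []
--
--     while queue:
--         s = queue.popleft()
--         order.append(s)
--
--         for neighbor in graph[s]:
--             if (s, neighbor) == deleted:
--                 continue
--             if neighbor not in visited:
--                 visited.add(neighbor)
--                 queue.append(neighbor)
--     return order
-- ===== SOURCE B (Python) =====
-- def bfs_modified(graph, start, deleted):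
--     visited = {start}
--     order = []
--     frontier = [start]
--     while frontier:
--         next_frontier = []
--         for u in frontier:
--             order.append(u)
--             for v in graph[u]:
--                 if (u, v) != deleted and v not in visited:
--                     visited.add(v)
--                     next_frontier.append(v)
--         frontier = next_frontier
--     return order
-- ===== Notes on version B (the rewrite author's own statement) =====
-- stated objective: alternative
-- what changed: Replaced the single FIFO deque loop by a level-synchronous BFS: a two-list frontier/next-frontier decomposition with an outer while-over-levels and an inner for-over-frontier, producing the identical visit order; Pre_ excludes inputs where a reached node is not a key of graph (KeyError) and association lists with duplicate keys, which do not represent a Python dict.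
-- outside the precondition, e.g. on bfs_modified({0: [], 1: [2]}, 0, (9, 9)): A returns [0], B returns [0]
import Mathlib
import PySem

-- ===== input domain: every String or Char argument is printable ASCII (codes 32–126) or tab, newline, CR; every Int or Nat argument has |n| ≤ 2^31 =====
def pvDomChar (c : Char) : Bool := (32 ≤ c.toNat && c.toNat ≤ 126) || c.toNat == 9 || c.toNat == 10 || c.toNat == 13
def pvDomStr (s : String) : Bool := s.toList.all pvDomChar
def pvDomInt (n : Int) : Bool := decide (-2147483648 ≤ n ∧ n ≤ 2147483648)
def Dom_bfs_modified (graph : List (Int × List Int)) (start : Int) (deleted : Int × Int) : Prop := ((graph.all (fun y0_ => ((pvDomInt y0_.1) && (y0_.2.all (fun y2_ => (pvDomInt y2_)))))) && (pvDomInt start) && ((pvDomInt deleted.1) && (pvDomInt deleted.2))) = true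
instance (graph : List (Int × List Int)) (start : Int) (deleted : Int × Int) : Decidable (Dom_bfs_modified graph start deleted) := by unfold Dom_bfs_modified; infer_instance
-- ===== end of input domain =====

-- B replaces A's single FIFO deque by a level-synchronous BFS (frontier / next-frontier lists); same visit order, proved equal on Pre_.


-- ===== PORT A =====
-- graph[s] on a dict: KeyError when s is not a key — such inputs are excluded by Pre_; the total form getD s []
-- is exact on Pre_ (keys nodup, every looked-up node is a key).
def pvNbrs (graph : List (Int × List Int)) (s : Int) : List Int :=
  (PySem.Dict.mk graph).getD s []

-- body of A's 'for neighbor in graph[s]' loop, state = (visited, queue)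
def pvAStep (deleted : Int × Int) (s : Int)
    (p : PySem.Set Int × List Int) (neighbor : Int) : PySem.Set Int × List Int :=
  if (s, neighbor) = deleted then p
  else if ¬ PySem.Set.contains p.1 neighbor then (PySem.Set.add p.1 neighbor, p.2 ++ [neighbor])
  else p

-- fuel bounds the number of 'while queue' iterations; pvFuel is proved sufficient below (totality guard only)
def pvALoop (graph : List (Int × List Int)) (deleted : Int × Int) :
    Nat → PySem.Set Int → List Int → List Int → List Int
  | 0, _, _, order => order
  | fuel+1, visited, queue, order =>
    match queue with
    | [] => order
    | s :: qs =>
      let order' := order ++ [s]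
      let vq := (pvNbrs graph s).foldl (pvAStep deleted s) (visited, qs)
      pvALoop graph deleted fuel vq.1 vq.2 order'

def pvFuel (graph : List (Int × List Int)) : Nat :=
  1 + (graph.map (fun p => p.2.length)).sum

def bfs_modified (graph : List (Int × List Int)) (start : Int) (deleted : Int × Int) : List Int :=
  pvALoop graph deleted (pvFuel graph) (PySem.Set.add PySem.Set.empty start) [start] []

-- ===== PORT B =====
-- body of B's inner 'for v in graph[u]' loop, state = (visited, next_frontier)
def pvBInner (deleted : Int × Int) (u : Int)
    (p : PySem.Set Int × List Int) (v : Int) : PySem.Set Int × List Int :=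
  if (u, v) ≠ deleted ∧ ¬ PySem.Set.contains p.1 v then (PySem.Set.add p.1 v, p.2 ++ [v]) else p

-- body of B's 'for u in frontier' loop, state = (visited, order, next_frontier)
def pvBLevel (graph : List (Int × List Int)) (deleted : Int × Int)
    (st : PySem.Set Int × List Int × List Int) (u : Int) :
    PySem.Set Int × List Int × List Int :=
  let order' := st.2.1 ++ [u]
  let vn := (pvNbrs graph u).foldl (pvBInner deleted u) (st.1, st.2.2)
  (vn.1, order', vn.2)

-- fuel bounds the number of 'while frontier' iterations (levels ≤ pops ≤ pvFuel; guard only)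
def pvBLoop (graph : List (Int × List Int)) (deleted : Int × Int) :
    Nat → PySem.Set Int → List Int → List Int → List Int
  | 0, _, _, order => order
  | fuel+1, visited, frontier, order =>
    match frontier with
    | [] => order
    | _ :: _ =>
      let st := frontier.foldl (pvBLevel graph deleted) (visited, order, [])
      pvBLoop graph deleted fuel st.1 st.2.2 st.2.1

def bfs_modified_alt (graph : List (Int × List Int)) (start : Int) (deleted : Int × Int) : List Int :=
  pvBLoop graph deleted (pvFuel graph) (PySem.Set.add PySem.Set.empty start) [start] []

-- ===== PRECONDITION & SPEC =====
-- Pre_ excludes (i) inputs on which A raises KeyError (start, or a non-deleted listed neighbor, missing from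
-- graph's keys — slightly wider than the exact reachable set, a closed-form over-approximation) and
-- (ii) association lists with duplicate keys, which do not represent a Python dict.
def Pre_bfs_modified (graph : List (Int × List Int)) (start : Int) (deleted : Int × Int) : Prop :=
  (graph.map Prod.fst).Nodup ∧
  start ∈ graph.map Prod.fst ∧
  ∀ p ∈ graph, ∀ v ∈ p.2, (p.1, v) = deleted ∨ v ∈ graph.map Prod.fst

instance (graph : List (Int × List Int)) (start : Int) (deleted : Int × Int) : Decidable (Pre_bfs_modified graph start deleted) := by
  unfold Pre_bfs_modified; infer_instance

def pvWitness_bfs_modified : (List (Int × List Int)) × Int × (Int × Int) :=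
  ([(0, [1, 2]), (1, [2, 3]), (2, [0])], 0, (1, 3))

def Spec_bfs_modified (graph : List (Int × List Int)) (start : Int) (deleted : Int × Int) (out : List Int) : Prop := out = bfs_modified_alt graph start deleted
instance (graph : List (Int × List Int)) (start : Int) (deleted : Int × Int) (out : List Int) : Decidable (Spec_bfs_modified graph start deleted out) := by unfold Spec_bfs_modified; infer_instance

-- ===== CLAIM (what is proved, stated in full; the proofs are below) =====
def Claim_equal_bfs_modified : Prop := ∀ (graph : List (Int × List Int)) (start : Int) (deleted : Int × Int), Dom_bfs_modified graph start deleted → Pre_bfs_modified graph start deleted → Spec_bfs_modified graph start deleted (bfs_modified graph start deleted)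

-- ===== LEMMAS AND PROOFS =====

-- the two loop bodies are the same function
theorem pvStep_eq (deleted : Int × Int) (s : Int) :
    pvAStep deleted s = pvBInner deleted s := by
  funext p w
  unfold pvAStep pvBInner
  by_cases h : (s, w) = deleted
  · simp [h]
  · simp [h]

-- A's queue fold only appends: a prefix q1 of the queue passes through untouched
theorem pvFold_append (deleted : Int × Int) (s : Int) (ws : List Int)
    (v : PySem.Set Int) (q1 q2 : List Int) :
    ws.foldl (pvAStep deleted s) (v, q1 ++ q2)
      = ((ws.foldl (pvAStep deleted s) (v, q2)).1,
         q1 ++ (ws.foldl (pvAStep deleted s) (v, q2)).2) := by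
  induction ws generalizing v q2 with
  | nil => simp
  | cons w ws ih =>
    simp only [List.foldl_cons]
    have hstep : ∀ q : List Int, pvAStep deleted s (v, q) w
        = if (s, w) = deleted then (v, q)
          else if ¬ PySem.Set.contains v w then (PySem.Set.add v w, q ++ [w]) else (v, q) :=
      fun _ => rfl
    rw [hstep, hstep]
    by_cases h : (s, w) = deleted
    · rw [if_pos h, if_pos h]; exact ih v q2
    · rw [if_neg h, if_neg h]
      by_cases h2 : ¬ PySem.Set.contains v w
      · rw [if_pos h2, if_pos h2, List.append_assoc]
        exact ih (PySem.Set.add v w) (q2 ++ [w])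
      · rw [if_neg h2, if_neg h2]; exact ih v q2

-- order-free form of one level: (visited, next_frontier) after processing frontier f
def pvLevel (graph : List (Int × List Int)) (deleted : Int × Int)
    (v : PySem.Set Int) (f n : List Int) : PySem.Set Int × List Int :=
  f.foldl (fun p u => (pvNbrs graph u).foldl (pvBInner deleted u) p) (v, n)

-- B's level fold = order accumulates exactly o ++ f, rest is pvLevel
theorem pvBLevel_fold (graph : List (Int × List Int)) (deleted : Int × Int)
    (f : List Int) (v : PySem.Set Int) (o n : List Int) :
    f.foldl (pvBLevel graph deleted) (v, o, n)
      = ((pvLevel graph deleted v f n).1, o ++ f, (pvLevel graph deleted v f n).2) := by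
  induction f generalizing v o n with
  | nil => simp [pvLevel]
  | cons u f ih =>
    simp only [List.foldl_cons, pvLevel]
    rw [show pvBLevel graph deleted (v, o, n) u
          = (((pvNbrs graph u).foldl (pvBInner deleted u) (v, n)).1, o ++ [u],
             ((pvNbrs graph u).foldl (pvBInner deleted u) (v, n)).2) from rfl]
    rw [ih]
    simp [pvLevel]

-- A, run for f.length pops starting from queue f ++ n, performs exactly one B-level
theorem pvALoop_level (graph : List (Int × List Int)) (deleted : Int × Int)
    (f : List Int) (k : Nat) (v : PySem.Set Int) (n o : List Int) :
    pvALoop graph deleted (f.length + k) v (f ++ n) o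
      = pvALoop graph deleted k (pvLevel graph deleted v f n).1
          (pvLevel graph deleted v f n).2 (o ++ f) := by
  induction f generalizing v n o with
  | nil => simp [pvLevel]
  | cons u f ih =>
    have hlen : (u :: f).length + k = (f.length + k) + 1 := by simp; omega
    rw [hlen]
    show pvALoop graph deleted (f.length + k)
        ((pvNbrs graph u).foldl (pvAStep deleted u) (v, f ++ n)).1
        ((pvNbrs graph u).foldl (pvAStep deleted u) (v, f ++ n)).2 (o ++ [u]) = _
    rw [pvFold_append, pvStep_eq, ih]
    simp only [pvLevel, List.foldl_cons]
    simp [List.append_assoc]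

-- number of pops B performs within the given number of levels
def pvPops (graph : List (Int × List Int)) (deleted : Int × Int) :
    Nat → PySem.Set Int → List Int → Nat
  | 0, _, _ => 0
  | fuel+1, v, f =>
    match f with
    | [] => 0
    | _ :: _ => f.length + pvPops graph deleted fuel (pvLevel graph deleted v f []).1 (pvLevel graph deleted v f []).2

-- B's run empties the frontier within the given number of levels
def pvDone (graph : List (Int × List Int)) (deleted : Int × Int) :
    Nat → PySem.Set Int → List Int → Prop
  | 0, _, f => f = []
  | fuel+1, v, f => f = [] ∨ pvDone graph deleted fuel (pvLevel graph deleted v f []).1 (pvLevel graph deleted v f []).2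

theorem pvALoop_nil (graph : List (Int × List Int)) (deleted : Int × Int)
    (fuel : Nat) (v : PySem.Set Int) (o : List Int) :
    pvALoop graph deleted fuel v [] o = o := by
  cases fuel <;> rfl

-- main bridge: when B terminates within fB levels, B equals A run with pvPops (+ any slack) fuel
theorem pvBridge (graph : List (Int × List Int)) (deleted : Int × Int)
    (fB : Nat) (v : PySem.Set Int) (f o : List Int) (k : Nat)
    (hd : pvDone graph deleted fB v f) :
    pvBLoop graph deleted fB v f o
      = pvALoop graph deleted (pvPops graph deleted fB v f + k) v f o := by
  induction fB generalizing v f o k with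
  | zero =>
    have : f = [] := hd
    subst this
    simp [pvBLoop, pvPops, pvALoop_nil]
  | succ fB ih =>
    cases f with
    | nil => simp [pvBLoop, pvPops, pvALoop_nil]
    | cons u fs =>
      have hd' : pvDone graph deleted fB (pvLevel graph deleted v (u :: fs) []).1 (pvLevel graph deleted v (u :: fs) []).2 := by
        rcases hd with h | h
        · exact absurd h (by simp)
        · exact h
      show pvBLoop graph deleted fB _ _ _ = _
      rw [pvBLevel_fold]
      have hp : pvPops graph deleted (fB+1) v (u :: fs)
          = (u :: fs).length + pvPops graph deleted fB (pvLevel graph deleted v (u :: fs) []).1 (pvLevel graph deleted v (u :: fs) []).2 := rfl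
      rw [hp, Nat.add_assoc]
      have := pvALoop_level graph deleted (u :: fs)
        (pvPops graph deleted fB (pvLevel graph deleted v (u :: fs) []).1 (pvLevel graph deleted v (u :: fs) []).2 + k)
        v [] o
      rw [List.append_nil] at this
      rw [this]
      exact ih _ _ _ _ hd'

-- the universe of all listed neighbors
def pvU (graph : List (Int × List Int)) : Finset Int :=
  graph.foldr (fun p acc => p.2.toFinset ∪ acc) ∅

theorem pvNbrs_subset_U (graph : List (Int × List Int)) (s w : Int)
    (h : w ∈ pvNbrs graph s) : w ∈ pvU graph := by
  induction graph with
  | nil => simp [pvNbrs, PySem.Dict.getD, PySem.Dict.get?] at h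
  | cons p g ih =>
    unfold pvNbrs PySem.Dict.getD at h ih
    rw [PySem.Dict.get?_mk_cons] at h
    by_cases he : p.1 == s
    · rw [if_pos he] at h
      simp only [Option.getD_some] at h
      simp [pvU, h]
    · rw [if_neg he] at h
      have := ih h
      simp [pvU] at this ⊢
      tauto

def pvUnvis (graph : List (Int × List Int)) (v : PySem.Set Int) : Nat :=
  ((pvU graph).filter (fun x => x ∉ v)).card

-- one pushed node: visited gains it, unvisited count drops by at least one
theorem pvUnvis_add (graph : List (Int × List Int)) (v : PySem.Set Int) (w : Int)
    (hU : w ∈ pvU graph) (hv : ¬ PySem.Set.contains v w) :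
    pvUnvis graph (PySem.Set.add v w) + 1 ≤ pvUnvis graph v := by
  have hvm : w ∉ v := by simpa [PySem.Set.contains] using hv
  have hss : (pvU graph).filter (fun x => x ∉ PySem.Set.add v w)
      ⊂ (pvU graph).filter (fun x => x ∉ v) := by
    rw [Finset.ssubset_def]
    constructor
    · intro x hx
      simp only [Finset.mem_filter] at hx ⊢
      refine ⟨hx.1, fun hxv => hx.2 ?_⟩
      rw [PySem.Set.mem_add]
      exact Or.inl hxv
    · intro hcon
      have hwmem : w ∈ (pvU graph).filter (fun x => x ∉ v) :=
        Finset.mem_filter.mpr ⟨hU, hvm⟩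
      have := Finset.mem_filter.mp (hcon hwmem)
      refine this.2 ?_
      rw [PySem.Set.mem_add]
      exact Or.inr rfl
  exact Nat.succ_le_of_lt (Finset.card_lt_card hss)

-- helper: the inner fold's measure bound
theorem pvInner_measure (graph : List (Int × List Int)) (deleted : Int × Int) (u : Int)
    (ws : List Int) (hws : ∀ w ∈ ws, w ∈ pvU graph) :
    ∀ (v : PySem.Set Int) (n : List Int),
    (ws.foldl (pvBInner deleted u) (v, n)).2.length + pvUnvis graph (ws.foldl (pvBInner deleted u) (v, n)).1
      ≤ n.length + pvUnvis graph v := by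
  induction ws with
  | nil => intro v n; simp
  | cons w ws ih =>
    intro v n
    have hw : w ∈ pvU graph := hws w (by simp)
    have hws' : ∀ x ∈ ws, x ∈ pvU graph := fun x hx => hws x (by simp [hx])
    simp only [List.foldl_cons]
    have hstep : pvBInner deleted u (v, n) w
        = if (u, w) ≠ deleted ∧ ¬ PySem.Set.contains v w
          then (PySem.Set.add v w, n ++ [w]) else (v, n) := rfl
    rw [hstep]
    by_cases h : (u, w) ≠ deleted ∧ ¬ PySem.Set.contains v w
    · rw [if_pos h]
      have h1 := ih hws' (PySem.Set.add v w) (n ++ [w])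
      have h2 := pvUnvis_add graph v w hw h.2
      simp only [List.length_append, List.length_cons, List.length_nil] at h1 ⊢
      omega
    · rw [if_neg h]
      exact ih hws' v n

-- the level fold's measure bound
theorem pvLevel_measure (graph : List (Int × List Int)) (deleted : Int × Int)
    (f : List Int) : ∀ (v : PySem.Set Int) (n : List Int),
    (pvLevel graph deleted v f n).2.length + pvUnvis graph (pvLevel graph deleted v f n).1
      ≤ n.length + pvUnvis graph v := by
  induction f with
  | nil => intro v n; simp [pvLevel]
  | cons u f ih =>
    intro v n
    unfold pvLevel
    simp only [List.foldl_cons]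
    have h1 := pvInner_measure graph deleted u (pvNbrs graph u)
      (fun w hw => pvNbrs_subset_U graph u w hw) v n
    have h2 := ih ((pvNbrs graph u).foldl (pvBInner deleted u) (v, n)).1
      ((pvNbrs graph u).foldl (pvBInner deleted u) (v, n)).2
    unfold pvLevel at h2
    simp only [Prod.mk.eta] at h2
    omega

-- enough fuel: B terminates and pops at most f.length + unvisited
theorem pvTerm (graph : List (Int × List Int)) (deleted : Int × Int) :
    ∀ (fuel : Nat) (v : PySem.Set Int) (f : List Int),
    f.length + pvUnvis graph v ≤ fuel →
    pvDone graph deleted fuel v f ∧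
      pvPops graph deleted fuel v f ≤ f.length + pvUnvis graph v := by
  intro fuel
  induction fuel with
  | zero =>
    intro v f h
    have : f = [] := by cases f <;> simp_all
    subst this
    exact ⟨rfl, by simp [pvPops]⟩
  | succ fuel ih =>
    intro v f h
    cases f with
    | nil => exact ⟨Or.inl rfl, by simp [pvPops]⟩
    | cons u fs =>
      have hm := pvLevel_measure graph deleted (u :: fs) v []
      simp only [List.length_nil, Nat.zero_add] at hm
      have hfuel : (pvLevel graph deleted v (u :: fs) []).2.length
          + pvUnvis graph (pvLevel graph deleted v (u :: fs) []).1 ≤ fuel := by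
        have : (u :: fs).length ≥ 1 := by simp
        omega
      obtain ⟨hd, hp⟩ := ih (pvLevel graph deleted v (u :: fs) []).1 (pvLevel graph deleted v (u :: fs) []).2 hfuel
      refine ⟨Or.inr hd, ?_⟩
      have : pvPops graph deleted (fuel+1) v (u :: fs)
          = (u :: fs).length + pvPops graph deleted fuel (pvLevel graph deleted v (u :: fs) []).1 (pvLevel graph deleted v (u :: fs) []).2 := rfl
      omega

theorem pvU_card_le (graph : List (Int × List Int)) :
    (pvU graph).card ≤ (graph.map (fun p => p.2.length)).sum := by
  induction graph with
  | nil => simp [pvU]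
  | cons p g ih =>
    have h1 : (pvU (p :: g)).card ≤ p.2.toFinset.card + (pvU g).card := by
      simpa [pvU] using Finset.card_union_le p.2.toFinset (pvU g)
    have h2 := List.toFinset_card_le p.2
    simp only [List.map_cons, List.sum_cons]
    omega

theorem pvMain (graph : List (Int × List Int)) (start : Int) (deleted : Int × Int) :
    bfs_modified graph start deleted = bfs_modified_alt graph start deleted := by
  unfold bfs_modified bfs_modified_alt
  set v0 := PySem.Set.add PySem.Set.empty start with hv0
  have hbound : (1 : Nat) + pvUnvis graph v0 ≤ pvFuel graph := by
    have h1 : pvUnvis graph v0 ≤ (pvU graph).card := Finset.card_filter_le _ _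
    have h2 := pvU_card_le graph
    unfold pvFuel
    omega
  have hle : ([start].length + pvUnvis graph v0) ≤ pvFuel graph := by simpa using hbound
  obtain ⟨hd, hp⟩ := pvTerm graph deleted (pvFuel graph) v0 [start] hle
  have hpF : pvPops graph deleted (pvFuel graph) v0 [start] ≤ pvFuel graph := le_trans hp hle
  have := pvBridge graph deleted (pvFuel graph) v0 [start] []
    (pvFuel graph - pvPops graph deleted (pvFuel graph) v0 [start]) hd
  rw [Nat.add_sub_cancel' hpF] at this
  exact this.symm

-- ===== VERDICT (by name: the statement is the Claim_ definition above) =====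
theorem bfs_modified_spec : Claim_equal_bfs_modified := by
  intro graph start deleted _ _
  exact pvMain graph start deleted
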